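-- pv_equiv track=rewrite | github.com/carlosdegoycoechea-dotcom/ARGO-v9 | ARGO_v9.0_CLEAN/core/conversation_summarizer.py | _create_fallback_summary
-- ===== SOURCE A (Python) =====
-- from typing import List, Dict, Tuple, Optional
--
-- def _create_fallback_summary(messages: List[Dict[str, str]]) -> str:
--     """
--     Create basic summary without LLM (fallback method).
--
--     Args:
--         messages: List of messages to summarize
--
--     Returns:
--         Basic summary text
--     """
--     user_messages = [m for m in messages if m.get('role') == 'user']
--     assistant_messages = [m for m in messages if m.get('role') == 'assistant']
--
--     summary_parts = [
--         f"Previous conversation covered {len(user_messages)} user queries",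
--         f"with {len(assistant_messages)} assistant responses.",
--     ]
--
--     # Include first and last user messages if available
--     if user_messages:
--         first_query = user_messages[0].get('content', '')[:100]
--         last_query = user_messages[-1].get('content', '')[:100]
--
--         summary_parts.append(f"Topics included: {first_query}...")
--         if len(user_messages) > 1:
--             summary_parts.append(f"Most recently discussing: {last_query}...")
--
--     return " ".join(summary_parts)
-- ===== SOURCE B (Python) =====
-- from typing import List, Dict
--
-- def _create_fallback_summary(messages: List[Dict[str, str]]) -> str:
--     # One pass: count roles and capture first/last user content on the fly.
--     user_count = 0
--     assistant_count = 0
--     first_user = None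
--     last_user = None
--     for m in messages:
--         role = m.get('role')
--         if role == 'user':
--             user_count += 1
--             content = m.get('content', '')
--             if first_user is None:
--                 first_user = content
--             last_user = content
--         elif role == 'assistant':
--             assistant_count += 1
--     parts = [
--         f"Previous conversation covered {user_count} user queries",
--         f"with {assistant_count} assistant responses.",
--     ]
--     if first_user is not None:
--         parts.append(f"Topics included: {first_user[:100]}...")
--         if user_count > 1:
--             parts.append(f"Most recently discussing: {last_user[:100]}...")
--     return " ".join(parts)
-- ===== Notes on version B (the rewrite author's own statement) =====
-- stated objective: alternative
-- what changed: Replaces the two filtering list comprehensions plus indexing into the filtered list with a single loop that counts user/assistant messages and captures the first and most recent user content while scanning.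
import Mathlib
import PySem

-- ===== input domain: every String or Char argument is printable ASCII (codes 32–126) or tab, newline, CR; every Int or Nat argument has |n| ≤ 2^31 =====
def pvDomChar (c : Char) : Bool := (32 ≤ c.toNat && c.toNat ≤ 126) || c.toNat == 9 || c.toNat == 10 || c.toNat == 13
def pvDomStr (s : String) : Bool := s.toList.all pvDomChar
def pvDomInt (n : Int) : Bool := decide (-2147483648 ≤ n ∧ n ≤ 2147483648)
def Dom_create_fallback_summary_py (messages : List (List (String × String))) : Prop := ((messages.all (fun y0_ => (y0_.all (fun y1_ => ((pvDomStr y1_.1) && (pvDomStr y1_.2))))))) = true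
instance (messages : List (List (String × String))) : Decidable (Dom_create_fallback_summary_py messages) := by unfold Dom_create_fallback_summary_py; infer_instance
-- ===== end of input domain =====

-- B replaces A's two filtering comprehensions and indexing with a single counting pass that carries the first and most recent user content (alternative decomposition, same cost).


-- ===== PORT A =====
def create_fallback_summary_py (messages : List (List (String × String))) : String :=
  let user_messages := messages.filter (fun m => List.lookup "role" m == some "user")
  let assistant_messages := messages.filter (fun m => List.lookup "role" m == some "assistant")
  let summary_parts : List String :=
    ["Previous conversation covered " ++ PySem.Int.toStr (user_messages.length : Int) ++ " user queries",
     "with " ++ PySem.Int.toStr (assistant_messages.length : Int) ++ " assistant responses."]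
  let summary_parts :=
    if user_messages = [] then summary_parts
    else
      let first_query := PySem.Str.slice ((List.lookup "content" ((PySem.List.pyGet? user_messages 0).getD [])).getD "") none (some 100)
      let last_query := PySem.Str.slice ((List.lookup "content" ((PySem.List.pyGet? user_messages (-1)).getD [])).getD "") none (some 100)
      let summary_parts := summary_parts ++ ["Topics included: " ++ first_query ++ "..."]
      if user_messages.length > 1 then
        summary_parts ++ ["Most recently discussing: " ++ last_query ++ "..."]
      else summary_parts
  PySem.Str.join " " summary_parts

-- ===== PORT B =====
-- the single scan of Source B: (user_count, assistant_count, first_user, last_user)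
def pvScan_create_fallback_summary : List (List (String × String)) →
    Int × Int × Option String × Option String → Int × Int × Option String × Option String
  | [], st => st
  | m :: rest, (uc, ac, fu, lu) =>
    let role := List.lookup "role" m
    if role == some "user" then
      let content := (List.lookup "content" m).getD ""
      pvScan_create_fallback_summary rest
        (uc + 1, ac, (match fu with | none => some content | some x => some x), some content)
    else if role == some "assistant" then
      pvScan_create_fallback_summary rest (uc, ac + 1, fu, lu)
    else
      pvScan_create_fallback_summary rest (uc, ac, fu, lu)

def create_fallback_summary_py_alt (messages : List (List (String × String))) : String :=
  let st := pvScan_create_fallback_summary messages (0, 0, none, none)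
  let uc := st.1; let ac := st.2.1; let fu := st.2.2.1; let lu := st.2.2.2
  let parts : List String :=
    ["Previous conversation covered " ++ PySem.Int.toStr uc ++ " user queries",
     "with " ++ PySem.Int.toStr ac ++ " assistant responses."]
  let parts :=
    match fu with
    | none => parts
    | some f =>
      let parts := parts ++ ["Topics included: " ++ PySem.Str.slice f none (some 100) ++ "..."]
      if uc > 1 then
        parts ++ ["Most recently discussing: " ++ PySem.Str.slice (lu.getD "") none (some 100) ++ "..."]
      else parts
  PySem.Str.join " " parts

-- ===== PRECONDITION & SPEC =====
def Spec_create_fallback_summary_py (messages : List (List (String × String))) (out : String) : Prop := out = create_fallback_summary_py_alt messages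
instance (messages : List (List (String × String))) (out : String) : Decidable (Spec_create_fallback_summary_py messages out) := by unfold Spec_create_fallback_summary_py; infer_instance

-- ===== CLAIM (what is proved, stated in full; the proofs are below) =====
def Claim_equal_create_fallback_summary_py : Prop := ∀ (messages : List (List (String × String))), Dom_create_fallback_summary_py messages → Spec_create_fallback_summary_py messages (create_fallback_summary_py messages)

-- ===== LEMMAS AND PROOFS =====

-- the scan computes the counts and first/last user contents of A's filtered lists
theorem pvScan_spec (l : List (List (String × String)))
    (uc ac : Int) (fu lu : Option String) :
    pvScan_create_fallback_summary l (uc, ac, fu, lu) =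
      (uc + ((l.filter (fun m => List.lookup "role" m == some "user")).length : Int),
       ac + ((l.filter (fun m => List.lookup "role" m == some "assistant")).length : Int),
       (match fu with
        | some x => some x
        | none => ((l.filter (fun m => List.lookup "role" m == some "user")).head?).map
            (fun m => (List.lookup "content" m).getD "")),
       (match ((l.filter (fun m => List.lookup "role" m == some "user")).getLast?).map
            (fun m => (List.lookup "content" m).getD "") with
        | some x => some x
        | none => lu)) := by
  induction l generalizing uc ac fu lu with
  | nil =>
    simp only [pvScan_create_fallback_summary, List.filter_nil, List.length_nil, Nat.cast_zero,
      Int.add_zero, List.head?_nil, List.getLast?_nil, Option.map_none]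
    cases fu <;> rfl
  | cons m rest ih =>
    by_cases hu : (List.lookup "role" m == some "user") = true
    · have hna : ¬ (List.lookup "role" m == some "assistant") = true := by simp_all
      have hfc : (m :: rest).filter (fun m => List.lookup "role" m == some "user")
          = m :: rest.filter (fun m => List.lookup "role" m == some "user") := by
        simp [hu]
      have hfa : (m :: rest).filter (fun m => List.lookup "role" m == some "assistant")
          = rest.filter (fun m => List.lookup "role" m == some "assistant") := by
        simp [hna]
      simp only [pvScan_create_fallback_summary, hu, if_pos]
      rw [ih, hfc, hfa, List.getLast?_cons]
      cases fu <;>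
        cases h : (rest.filter (fun m => List.lookup "role" m == some "user")).getLast? <;>
          simp only [h, Option.map_some, Option.map_none, Option.getD_some, Option.getD_none,
            Prod.mk.injEq, List.length_cons] <;>
        and_intros <;> first
          | (push_cast; ring)
          | rfl
          | trivial
    · by_cases ha : (List.lookup "role" m == some "assistant") = true
      · have hfc : (m :: rest).filter (fun m => List.lookup "role" m == some "user")
            = rest.filter (fun m => List.lookup "role" m == some "user") := by
          simp [hu]
        have hfa : (m :: rest).filter (fun m => List.lookup "role" m == some "assistant")
            = m :: rest.filter (fun m => List.lookup "role" m == some "assistant") := by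
          simp [ha]
        simp only [pvScan_create_fallback_summary, hu, ha, Bool.false_eq_true, if_neg,
          not_false_iff, if_pos]
        rw [ih, hfc, hfa]
        simp only [Prod.mk.injEq, List.length_cons]
        and_intros <;> first
          | (push_cast; ring)
          | rfl
          | trivial
      · have hfc : (m :: rest).filter (fun m => List.lookup "role" m == some "user")
            = rest.filter (fun m => List.lookup "role" m == some "user") := by
          simp [hu]
        have hfa : (m :: rest).filter (fun m => List.lookup "role" m == some "assistant")
            = rest.filter (fun m => List.lookup "role" m == some "assistant") := by
          simp [ha]
        simp only [pvScan_create_fallback_summary, hu, ha, Bool.false_eq_true, if_neg,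
          not_false_iff]
        rw [ih, hfc, hfa]

-- ===== VERDICT (by name: the statement is the Claim_ definition above) =====
theorem create_fallback_summary_py_spec : Claim_equal_create_fallback_summary_py := by
  intro messages _
  show create_fallback_summary_py messages = create_fallback_summary_py_alt messages
  unfold create_fallback_summary_py create_fallback_summary_py_alt
  rw [pvScan_spec]
  set U := messages.filter (fun m => List.lookup "role" m == some "user") with hU
  simp only [Int.zero_add]
  by_cases hne : U = []
  · simp [hne]
  · obtain ⟨u, hhead⟩ : ∃ u, U.head? = some u := by
      cases h : U.head? with
      | none => exact absurd (List.head?_eq_none_iff.mp h) hne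
      | some u => exact ⟨u, rfl⟩
    obtain ⟨w, hL⟩ : ∃ w, U.getLast? = some w := by
      cases h : U.getLast? with
      | none => exact absurd (List.getLast?_eq_none_iff.mp h) hne
      | some w => exact ⟨w, rfl⟩
    have h0 : PySem.List.pyGet? U 0 = some u := by
      rw [PySem.List.pyGet?_zero, ← List.head?_eq_getElem?]; exact hhead
    have hm1 : PySem.List.pyGet? U (-1) = some w := by
      rw [PySem.List.pyGet?_neg_one, hL]
    rw [if_neg hne, hhead, hL, h0, hm1]
    simp only [Option.map_some, Option.getD_some]
    by_cases hl : 1 < U.length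
    · have hl' : (1 : Int) < (U.length : Int) := by exact_mod_cast hl
      rw [if_pos hl, if_pos hl']
    · have hl' : ¬ (1 : Int) < (U.length : Int) := by exact_mod_cast hl
      rw [if_neg hl, if_neg hl']
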